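-- pv_equiv track=rewrite | github.com/BernardUriza/free-intelligence | backend/llm_router_policy.py | has_forbidden_import
-- ===== SOURCE A (Python) =====
-- FORBIDDEN_IMPORTS = {
--     "anthropic",
--     "openai",
--     "cohere",
--     "google.generativeai",
--     "huggingface_hub",
--     "transformers",
-- }
--
-- def has_forbidden_import(imports: set[str]) -> list[str]:
--     """
--     Verifica si hay imports prohibidos.
--
--     Returns:
--         Lista de imports prohibidos encontrados
--     """
--     forbidden = []
--
--     for imp in imports:
--         # Check exact match
--         if imp in FORBIDDEN_IMPORTS:
--             forbidden.append(imp)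
--             continue
--
--         # Check prefix match (e.g., google.generativeai)
--         for forbidden_imp in FORBIDDEN_IMPORTS:
--             if imp.startswith(forbidden_imp + "."):
--                 forbidden.append(imp)
--                 break
--
--     return forbidden
-- ===== SOURCE B (Python) =====
-- FORBIDDEN_IMPORTS = {
--     "anthropic",
--     "openai",
--     "cohere",
--     "google.generativeai",
--     "huggingface_hub",
--     "transformers",
-- }
--
-- def _dotted_prefixes(name):
--     """Yield 'a', 'a.b', 'a.b.c', ... for name 'a.b.c...'."""
--     parts = name.split('.')
--     prefix = parts[0]
--     yield prefix
--     for seg in parts[1:]: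
--         prefix += '.' + seg
--         yield prefix
--
-- def has_forbidden_import(imports):
--     """An import is forbidden iff one of its own dotted prefixes is a forbidden name."""
--     return [imp for imp in imports
--             if any(p in FORBIDDEN_IMPORTS for p in _dotted_prefixes(imp))]
-- ===== Notes on version B (the rewrite author's own statement) =====
-- stated objective: simpler
-- what changed: Instead of scanning the whole forbidden set with startswith for every import, B generates the import's own dotted prefixes (by splitting on '.' and accumulating segments) and tests each with a single set-membership lookup, as one list comprehension.
import Mathlib
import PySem

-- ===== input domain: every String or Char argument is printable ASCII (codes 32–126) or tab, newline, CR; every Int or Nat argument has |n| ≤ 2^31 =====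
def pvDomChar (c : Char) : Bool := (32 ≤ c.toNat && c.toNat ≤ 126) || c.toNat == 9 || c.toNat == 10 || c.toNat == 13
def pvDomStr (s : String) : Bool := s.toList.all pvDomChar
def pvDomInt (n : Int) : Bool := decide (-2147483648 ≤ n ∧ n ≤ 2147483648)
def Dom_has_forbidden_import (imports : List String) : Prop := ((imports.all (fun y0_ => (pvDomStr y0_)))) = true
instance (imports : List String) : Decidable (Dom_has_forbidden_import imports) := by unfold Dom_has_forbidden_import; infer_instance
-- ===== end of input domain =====

-- B tests each import's own accumulated dotted prefixes against the forbidden set instead of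
-- scanning the forbidden set with startswith per import — a simpler one-comprehension shape.

-- ===== PORT A =====
def FORBIDDEN_IMPORTS : List String :=
  ["anthropic", "openai", "cohere", "google.generativeai", "huggingface_hub", "transformers"]

def has_forbidden_import (imports : List String) : List String :=
  imports.foldl (fun forbidden imp =>
    if FORBIDDEN_IMPORTS.contains imp then forbidden ++ [imp]
    else if FORBIDDEN_IMPORTS.any (fun f => PySem.Chars.startswith imp.toList (f.toList ++ ['.'])) then
      forbidden ++ [imp]
    else forbidden) []

-- ===== PORT B =====
def FORBIDDEN_CHARS : List (List Char) := FORBIDDEN_IMPORTS.map String.toList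

-- the 'for seg in parts[1:]' accumulation of _dotted_prefixes
def prefixesAux : List Char → List (List Char) → List (List Char)
  | _, [] => []
  | pre, seg :: rest => (pre ++ '.' :: seg) :: prefixesAux (pre ++ '.' :: seg) rest

-- _dotted_prefixes: 'a', 'a.b', 'a.b.c', … (split never returns [], so the [] arm is unreachable)
def dottedPrefixes (name : List Char) : List (List Char) :=
  match PySem.Chars.splitOn name ['.'] with
  | [] => []
  | p0 :: tl => p0 :: prefixesAux p0 tl

def has_forbidden_import_alt (imports : List String) : List String :=
  imports.filter (fun imp =>
    (dottedPrefixes imp.toList).any (fun p => FORBIDDEN_CHARS.contains p))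

-- ===== PRECONDITION & SPEC =====
def Spec_has_forbidden_import (imports : List String) (out : List String) : Prop := out = has_forbidden_import_alt imports
instance (imports : List String) (out : List String) : Decidable (Spec_has_forbidden_import imports out) := by unfold Spec_has_forbidden_import; infer_instance

-- ===== CLAIM (what is proved, stated in full; the proofs are below) =====
def Claim_equal_has_forbidden_import : Prop := ∀ (imports : List String), Dom_has_forbidden_import imports → Spec_has_forbidden_import imports (has_forbidden_import imports)

-- ===== LEMMAS AND PROOFS =====

-- structural single-char split, proved equal to PySem.Chars.splitOn _ ['.']
def mySplit : List Char → List Char → List (List Char)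
  | pre, [] => [pre]
  | pre, c :: rest => if c = '.' then pre :: mySplit [] rest else mySplit (pre ++ [c]) rest

lemma go_eq (fuel : Nat) : ∀ (l cur : List Char) (acc : List (List Char)), l.length < fuel →
    PySem.Chars.splitOn.go ['.'] fuel l cur acc = acc.reverse ++ mySplit cur.reverse l := by
  induction fuel with
  | zero => intro l cur acc h; omega
  | succ n ih =>
    intro l cur acc h
    cases l with
    | nil => simp [PySem.Chars.splitOn.go, mySplit]
    | cons c rest =>
      simp only [PySem.Chars.splitOn.go]
      by_cases hc : c = '.'
      · subst hc
        rw [if_pos (by simp [List.isPrefixOf])]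
        simp only [List.length_cons] at h
        simp only [List.length_cons, List.length_nil, List.drop_succ_cons, List.drop_zero]
        rw [ih rest [] (cur.reverse :: acc) (by omega)]
        simp [mySplit]
      · rw [if_neg (by simp [List.isPrefixOf]; exact fun h => hc h.symm)]
        simp only [List.length_cons] at h
        rw [ih rest (c :: cur) acc (by omega)]
        simp [mySplit, hc]

lemma splitOn_eq_mySplit (l : List Char) : PySem.Chars.splitOn l ['.'] = mySplit [] l := by
  have := go_eq (l.length + 1) l [] [] (by omega)
  simpa [PySem.Chars.splitOn] using this

lemma prefixesAux_mySplit (l : List Char) : ∀ (pre q : List Char),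
    ((prefixesAux q (mySplit pre l)).any (fun p => FORBIDDEN_CHARS.contains p) = true) ↔
    ∃ t, (t = l ∨ ∃ u, l = t ++ '.' :: u) ∧ FORBIDDEN_CHARS.contains (q ++ '.' :: (pre ++ t)) = true := by
  induction l with
  | nil =>
    intro pre q
    simp only [mySplit, prefixesAux, List.any_cons, List.any_nil, Bool.or_false]
    constructor
    · intro h; exact ⟨[], Or.inl rfl, by simpa using h⟩
    · rintro ⟨t, ht, hc⟩
      rcases ht with rfl | ⟨u, hu⟩
      · simpa using hc
      · cases t <;> simp at hu
  | cons c rest ih =>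
    intro pre q
    by_cases hc : c = '.'
    · subst hc
      rw [show mySplit pre ('.' :: rest) = pre :: mySplit [] rest from by simp [mySplit]]
      simp only [prefixesAux, List.any_cons]
      rw [Bool.or_eq_true, ih [] (q ++ '.' :: pre)]
      constructor
      · rintro (h | ⟨t', ht', hct'⟩)
        · exact ⟨[], Or.inr ⟨rest, rfl⟩, by simpa using h⟩
        · refine ⟨'.' :: t', ?_, by simpa using hct'⟩
          rcases ht' with rfl | ⟨u, rfl⟩
          · exact Or.inl rfl
          · exact Or.inr ⟨u, rfl⟩
      · rintro ⟨t, ht, hct⟩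
        cases t with
        | nil =>
          left
          rcases ht with h | ⟨u, hu⟩
          · simp at h
          · simpa using hct
        | cons c' t' =>
          have hc' : c' = '.' := by
            rcases ht with h | ⟨u, hu⟩
            · exact (List.cons.inj h).1
            · exact (List.cons.inj hu).1.symm
          subst hc'
          right
          refine ⟨t', ?_, by simpa using hct⟩
          rcases ht with h | ⟨u, hu⟩
          · exact Or.inl (List.cons.inj h).2
          · exact Or.inr ⟨u, (List.cons.inj hu).2⟩
    · rw [show mySplit pre (c :: rest) = mySplit (pre ++ [c]) rest from by simp [mySplit, hc]]
      rw [ih (pre ++ [c]) q]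
      constructor
      · rintro ⟨t', ht', hct'⟩
        refine ⟨c :: t', ?_, by simpa using hct'⟩
        rcases ht' with rfl | ⟨u, rfl⟩
        · exact Or.inl rfl
        · exact Or.inr ⟨u, rfl⟩
      · rintro ⟨t, ht, hct⟩
        cases t with
        | nil =>
          exfalso
          rcases ht with h | ⟨u, hu⟩
          · simp at h
          · exact hc (List.cons.inj hu).1
        | cons c' t' =>
          have hc' : c' = c := by
            rcases ht with h | ⟨u, hu⟩
            · exact (List.cons.inj h).1
            · exact (List.cons.inj hu).1.symm
          subst hc'
          refine ⟨t', ?_, by simpa using hct⟩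
          rcases ht with h | ⟨u, hu⟩
          · exact Or.inl (List.cons.inj h).2
          · exact Or.inr ⟨u, (List.cons.inj hu).2⟩

-- the head-plus-accumulated-prefix list of Source B, as a function of the parts list
def hitList : List (List Char) → List (List Char)
  | [] => []
  | p0 :: tl => p0 :: prefixesAux p0 tl

lemma dotted_eq_hitList (l : List Char) :
    dottedPrefixes l = hitList (mySplit [] l) := by
  unfold dottedPrefixes hitList
  rw [splitOn_eq_mySplit]

lemma hit_mySplit (l : List Char) : ∀ (pre : List Char),
    ((hitList (mySplit pre l)).any (fun p => FORBIDDEN_CHARS.contains p) = true) ↔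
    ∃ t, (t = l ∨ ∃ u, l = t ++ '.' :: u) ∧ FORBIDDEN_CHARS.contains (pre ++ t) = true := by
  induction l with
  | nil =>
    intro pre
    simp only [mySplit, hitList, prefixesAux, List.any_cons, List.any_nil, Bool.or_false]
    constructor
    · intro h; exact ⟨[], Or.inl rfl, by simpa using h⟩
    · rintro ⟨t, ht, hct⟩
      rcases ht with rfl | ⟨u, hu⟩
      · simpa using hct
      · cases t <;> simp at hu
  | cons c rest ih =>
    intro pre
    by_cases hc : c = '.'
    · subst hc
      rw [show mySplit pre ('.' :: rest) = pre :: mySplit [] rest from by simp [mySplit]]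
      simp only [hitList, List.any_cons]
      rw [Bool.or_eq_true, prefixesAux_mySplit rest [] pre]
      constructor
      · rintro (h | ⟨t', ht', hct'⟩)
        · exact ⟨[], Or.inr ⟨rest, rfl⟩, by simpa using h⟩
        · refine ⟨'.' :: t', ?_, by simpa using hct'⟩
          rcases ht' with rfl | ⟨u, rfl⟩
          · exact Or.inl rfl
          · exact Or.inr ⟨u, rfl⟩
      · rintro ⟨t, ht, hct⟩
        cases t with
        | nil =>
          left
          rcases ht with h | ⟨u, hu⟩
          · simp at h
          · simpa using hct
        | cons c' t' =>
          have hc' : c' = '.' := by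
            rcases ht with h | ⟨u, hu⟩
            · exact (List.cons.inj h).1
            · exact (List.cons.inj hu).1.symm
          subst hc'
          right
          refine ⟨t', ?_, by simpa using hct⟩
          rcases ht with h | ⟨u, hu⟩
          · exact Or.inl (List.cons.inj h).2
          · exact Or.inr ⟨u, (List.cons.inj hu).2⟩
    · rw [show mySplit pre (c :: rest) = mySplit (pre ++ [c]) rest from by simp [mySplit, hc]]
      rw [ih (pre ++ [c])]
      constructor
      · rintro ⟨t', ht', hct'⟩
        refine ⟨c :: t', ?_, by simpa using hct'⟩
        rcases ht' with rfl | ⟨u, rfl⟩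
        · exact Or.inl rfl
        · exact Or.inr ⟨u, rfl⟩
      · rintro ⟨t, ht, hct⟩
        cases t with
        | nil =>
          exfalso
          rcases ht with h | ⟨u, hu⟩
          · simp at h
          · exact hc (List.cons.inj hu).1
        | cons c' t' =>
          have hc' : c' = c := by
            rcases ht with h | ⟨u, hu⟩
            · exact (List.cons.inj h).1
            · exact (List.cons.inj hu).1.symm
          subst hc'
          refine ⟨t', ?_, by simpa using hct⟩
          rcases ht with h | ⟨u, hu⟩
          · exact Or.inl (List.cons.inj h).2
          · exact Or.inr ⟨u, (List.cons.inj hu).2⟩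

lemma dottedPrefixes_char (l : List Char) :
    ((dottedPrefixes l).any (fun p => FORBIDDEN_CHARS.contains p) = true) ↔
    ∃ t, (t = l ∨ ∃ u, l = t ++ '.' :: u) ∧ FORBIDDEN_CHARS.contains t = true := by
  rw [dotted_eq_hitList, hit_mySplit l []]
  simp

lemma cond_eq (imp : String) :
    (FORBIDDEN_IMPORTS.contains imp
      || FORBIDDEN_IMPORTS.any (fun f => PySem.Chars.startswith imp.toList (f.toList ++ ['.'])))
    = ((dottedPrefixes imp.toList).any (fun p => FORBIDDEN_CHARS.contains p)) := by
  rw [Bool.eq_iff_iff, Bool.or_eq_true, dottedPrefixes_char]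
  constructor
  · rintro (h | h)
    · refine ⟨imp.toList, Or.inl rfl, ?_⟩
      rw [List.contains_iff_mem] at h ⊢
      simp only [FORBIDDEN_CHARS, List.mem_map]
      exact ⟨imp, h, rfl⟩
    · rw [List.any_eq_true] at h
      obtain ⟨f, hf, hsw⟩ := h
      rw [PySem.Chars.startswith_iff] at hsw
      obtain ⟨u, hu⟩ := hsw
      refine ⟨f.toList, Or.inr ⟨u, by simp [← hu]⟩, ?_⟩
      rw [List.contains_iff_mem]
      simp only [FORBIDDEN_CHARS, List.mem_map]
      exact ⟨f, hf, rfl⟩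
  · rintro ⟨t, ht, hct⟩
    rw [List.contains_iff_mem] at hct
    simp only [FORBIDDEN_CHARS, List.mem_map] at hct
    obtain ⟨f, hf, rfl⟩ := hct
    rcases ht with h | ⟨u, hu⟩
    · left
      rw [List.contains_iff_mem]
      rw [String.toList_inj.mp h.symm]
      exact hf
    · right
      rw [List.any_eq_true]
      refine ⟨f, hf, ?_⟩
      rw [PySem.Chars.startswith_iff]
      exact ⟨u, by simp [hu]⟩

lemma ports_eq (imports : List String) :
    has_forbidden_import imports = has_forbidden_import_alt imports := by
  unfold has_forbidden_import has_forbidden_import_alt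
  have h1 : ∀ (acc : List String) (imp : String),
      (if FORBIDDEN_IMPORTS.contains imp then acc ++ [imp]
       else if FORBIDDEN_IMPORTS.any (fun f => PySem.Chars.startswith imp.toList (f.toList ++ ['.'])) then acc ++ [imp]
       else acc)
      = (if ((dottedPrefixes imp.toList).any (fun p => FORBIDDEN_CHARS.contains p)) then acc ++ [imp] else acc) := by
    intro acc imp
    rw [← cond_eq imp]
    by_cases h1 : FORBIDDEN_IMPORTS.contains imp = true
    · rw [if_pos h1, if_pos (by rw [Bool.or_eq_true]; exact Or.inl h1)]
    · rw [if_neg h1]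
      by_cases h2 : FORBIDDEN_IMPORTS.any (fun f => PySem.Chars.startswith imp.toList (f.toList ++ ['.'])) = true
      · rw [if_pos h2, if_pos (by rw [Bool.or_eq_true]; exact Or.inr h2)]
      · rw [if_neg h2, if_neg (by rw [Bool.or_eq_true]; rintro (h | h) <;> [exact h1 h; exact h2 h])]
  calc imports.foldl (fun forbidden imp =>
        if FORBIDDEN_IMPORTS.contains imp then forbidden ++ [imp]
        else if FORBIDDEN_IMPORTS.any (fun f => PySem.Chars.startswith imp.toList (f.toList ++ ['.'])) then forbidden ++ [imp]
        else forbidden) []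
      = imports.foldl (fun acc imp =>
          if ((dottedPrefixes imp.toList).any (fun p => FORBIDDEN_CHARS.contains p)) then acc ++ [imp] else acc) [] := by
        congr 1; funext acc imp; exact h1 acc imp
    _ = [] ++ imports.filter (fun imp => (dottedPrefixes imp.toList).any (fun p => FORBIDDEN_CHARS.contains p)) :=
        PySem.List.foldl_append_if_eq_filter _ _ _
    _ = _ := by simp

-- ===== VERDICT (by name: the statement is the Claim_ definition above) =====
theorem has_forbidden_import_spec : Claim_equal_has_forbidden_import := by
  intro imports _
  unfold Spec_has_forbidden_import
  exact ports_eq imports
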